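-- pv_equiv track=rewrite | github.com/dunatomas/women-do-better-in-sports | app/app.py | sort_events_custom
-- ===== SOURCE A (Python) =====
-- def sort_events_custom(events: list[str]) -> list[str]:
--     events = [e for e in events if isinstance(e, str)]
--
--     # 1) Custom athletics order (your explicit list)
--     athletics_order = [
--         "100m", "4x100m_relays", "200m", "400m", "4x400m_relays",
--         "800m", "1500m", "3000m", "5000m", "10000m",
--         "half_marathon", "marathon",
--         "high_jump", "long_jump", "triple_jump", "pole_vault",
--     ]
--     athletics_rank = {e: i for i, e in enumerate(athletics_order)}
--
--     def is_swim(e: str) -> bool: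
--         return e.lower().startswith("swimming_") or e.lower().startswith("swim")
--
--     # 2) Swimming sort: stroke, then distances (50,100,200,400,800,1500), then relay last
--     swim_dist_rank = {"50m": 0, "100m": 1, "200m": 2, "400m": 3, "800m": 4, "1500m": 5}
--     stroke_rank = {
--         "freestyle": 0,
--         "backstroke": 1,
--         "breaststroke": 2,
--         "butterfly": 3,
--         "medley": 4,
--     }
--
--     def swim_key(e: str):
--         el = e.lower()
--
--         # Try to extract distance token like "50m", "100m", ...
--         dist = None
--         for d in swim_dist_rank.keys():
--             if d in el:
--                 dist = d
--                 break
--         dist_i = swim_dist_rank.get(dist, 99)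
--
--         is_relay = 1 if "relay" in el else 0
--
--         # Stroke
--         stroke_i = 99
--         for s, idx in stroke_rank.items():
--             if s in el:
--                 stroke_i = idx
--                 break
--
--         return (stroke_i, dist_i, is_relay, el)
--
--     def key(e: str):
--         el = e.lower()
--
--         # athletics explicit order first
--         if e in athletics_rank:
--             return (0, athletics_rank[e], el)
--
--         # then swimming
--         if is_swim(e):
--             return (1, ) + swim_key(e)
--
--         # then everything else alphabetically
--         return (2, el)
--
--     return sorted(events, key=key)
-- ===== SOURCE B (Python) =====
-- def sort_events_custom(events: list[str]) -> list[str]: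
--     athletics_order = [
--         "100m", "4x100m_relays", "200m", "400m", "4x400m_relays",
--         "800m", "1500m", "3000m", "5000m", "10000m",
--         "half_marathon", "marathon",
--         "high_jump", "long_jump", "triple_jump", "pole_vault",
--     ]
--     rank = {e: i for i, e in enumerate(athletics_order)}
--     swim_dists = ["50m", "100m", "200m", "400m", "800m", "1500m"]
--     strokes = ["freestyle", "backstroke", "breaststroke", "butterfly", "medley"]
--
--     def swim_key(e: str):
--         el = e.lower()
--         dist = next((i for i, d in enumerate(swim_dists) if d in el), 99)
--         stroke = next((i for i, s in enumerate(strokes) if s in el), 99)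
--         return (stroke, dist, 1 if "relay" in el else 0, el)
--
--     ath, swim, other = [], [], []
--     for e in events:
--         if not isinstance(e, str):
--             continue
--         el = e.lower()
--         if e in rank:
--             ath.append(e)
--         elif el.startswith("swimming_") or el.startswith("swim"):
--             swim.append(e)
--         else:
--             other.append(e)
--
--     ath.sort(key=lambda e: (rank[e], e.lower()))
--     swim.sort(key=swim_key)
--     other.sort(key=str.lower)
--     return ath + swim + other
-- ===== Notes on version B (the rewrite author's own statement) =====
-- stated objective: alternative
-- what changed: Instead of one sort of the whole list under a 3-way composite key, B partitions the events into athletics/swimming/other in a single pass and stably sorts each bucket by its own shorter key, concatenating the three sorted buckets.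
import Mathlib
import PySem

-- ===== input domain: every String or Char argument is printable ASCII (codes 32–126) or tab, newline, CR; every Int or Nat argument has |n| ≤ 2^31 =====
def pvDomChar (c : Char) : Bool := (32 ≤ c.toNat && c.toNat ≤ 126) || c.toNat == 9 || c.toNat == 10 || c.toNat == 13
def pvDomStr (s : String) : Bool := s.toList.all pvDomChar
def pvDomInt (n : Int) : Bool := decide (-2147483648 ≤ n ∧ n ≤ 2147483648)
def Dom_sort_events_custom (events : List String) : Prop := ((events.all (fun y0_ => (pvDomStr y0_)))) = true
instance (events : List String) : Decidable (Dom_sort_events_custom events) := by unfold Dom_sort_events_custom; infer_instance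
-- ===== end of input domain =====

-- B re-sorts by partitioning into the three categories in one pass and sorting each bucket by its own
-- (shorter) key instead of one keyed sort of the whole list; equal return value, objective: alternative.

-- Shared module constants (Python: same literals in both implementations).
def athleticsOrder : List String :=
  ["100m", "4x100m_relays", "200m", "400m", "4x400m_relays",
   "800m", "1500m", "3000m", "5000m", "10000m",
   "half_marathon", "marathon",
   "high_jump", "long_jump", "triple_jump", "pole_vault"]

-- {e: i for i, e in enumerate(athletics_order)}
def athleticsRank : PySem.Dict String Int :=
  (PySem.List.enumerate athleticsOrder 0).foldl (fun d p => d.insert p.2 p.1) PySem.Dict.empty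

-- el (= e.lower()) as its list of character codes: Python compares strings lexicographically by code
-- point, which is exactly lexicographic `<` on this List Int.
def lowerCodes (e : String) : List Int :=
  (PySem.Str.lower e).toList.map (fun c => (c.toNat : Int))

-- ===== PORT A =====
-- Python's sort keys are variable-length tuples compared lexicographically; they are encoded as
-- List Int, (0, r, el) ↦ [0, r] ++ codes(el) etc. — exact, since tuple comparison, list comparison
-- and string comparison are all the same lexicographic rule.

def isSwimA (e : String) : Bool :=
  PySem.Str.startswith (PySem.Str.lower e) "swimming_" || PySem.Str.startswith (PySem.Str.lower e) "swim"

def swimDistRank : PySem.Dict String Int :=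
  PySem.Dict.ofList [("50m", 0), ("100m", 1), ("200m", 2), ("400m", 3), ("800m", 4), ("1500m", 5)]

def strokeRank : PySem.Dict String Int :=
  PySem.Dict.ofList [("freestyle", 0), ("backstroke", 1), ("breaststroke", 2), ("butterfly", 3), ("medley", 4)]

def swimKeyA (e : String) : List Int :=
  let el := PySem.Str.lower e
  -- for d in swim_dist_rank.keys(): if d in el: dist = d; break  /  dist_i = swim_dist_rank.get(dist, 99)
  let dist_i : Int :=
    match (swimDistRank.keys).find? (fun d => PySem.Str.isIn d el) with
    | some d => swimDistRank.getD d 99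
    | none => 99
  let is_relay : Int := if PySem.Str.isIn "relay" el then 1 else 0
  -- for s, idx in stroke_rank.items(): if s in el: stroke_i = idx; break
  let stroke_i : Int :=
    match (strokeRank.items).find? (fun p => PySem.Str.isIn p.1 el) with
    | some p => p.2
    | none => 99
  [stroke_i, dist_i, is_relay] ++ lowerCodes e

def keyA (e : String) : List Int :=
  -- 'if e in athletics_rank: return (0, athletics_rank[e], el)' — the membership test and the
  -- lookup rendered as one match on get?
  match athleticsRank.get? e with
  | some r => [0, r] ++ lowerCodes e
  | none => if isSwimA e then 1 :: swimKeyA e else 2 :: lowerCodes e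

-- the isinstance(e, str) filter keeps every element of a List String: identity here
def sort_events_custom (events : List String) : List String :=
  PySem.List.sorted events keyA false

-- ===== PORT B =====
def swimDists : List String := ["50m", "100m", "200m", "400m", "800m", "1500m"]
def strokes : List String := ["freestyle", "backstroke", "breaststroke", "butterfly", "medley"]

def swimKeyB (e : String) : List Int :=
  let el := PySem.Str.lower e
  let dist : Int :=
    match (PySem.List.enumerate swimDists 0).find? (fun p => PySem.Str.isIn p.2 el) with
    | some p => p.1
    | none => 99
  let stroke : Int :=
    match (PySem.List.enumerate strokes 0).find? (fun p => PySem.Str.isIn p.2 el) with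
    | some p => p.1
    | none => 99
  [stroke, dist, if PySem.Str.isIn "relay" el then 1 else 0] ++ lowerCodes e

-- rank[e]: every element of the athletics bucket is a key of the dict, so KeyError is unreachable
def athKeyB (e : String) : List Int :=
  athleticsRank.getD e 0 :: lowerCodes e

def otherKeyB (e : String) : List Int := lowerCodes e

-- the loop body: append each (always-a-str) element to its bucket
def bStep (acc : List String × List String × List String) (e : String) :
    List String × List String × List String :=
  if athleticsRank.contains e then (acc.1 ++ [e], acc.2.1, acc.2.2)
  else if PySem.Str.startswith (PySem.Str.lower e) "swimming_" ||
          PySem.Str.startswith (PySem.Str.lower e) "swim" then (acc.1, acc.2.1 ++ [e], acc.2.2)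
  else (acc.1, acc.2.1, acc.2.2 ++ [e])

def sort_events_custom_alt (events : List String) : List String :=
  -- one pass over events
  let t := events.foldl bStep ([], [], [])
  PySem.List.sorted t.1 athKeyB false ++
    PySem.List.sorted t.2.1 swimKeyB false ++
    PySem.List.sorted t.2.2 otherKeyB false

-- ===== PRECONDITION & SPEC =====
def Spec_sort_events_custom (events : List String) (out : List String) : Prop := out = sort_events_custom_alt events
instance (events : List String) (out : List String) : Decidable (Spec_sort_events_custom events out) := by unfold Spec_sort_events_custom; infer_instance

-- ===== CLAIM (what is proved, stated in full; the proofs are below) =====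
def Claim_equal_sort_events_custom : Prop := ∀ (events : List String), Dom_sort_events_custom events → Spec_sort_events_custom events (sort_events_custom events)

-- ===== LEMMAS AND PROOFS =====

lemma insertBy_nil {α : Type} (b : α → α → Bool) (x : α) : PySem.List.insertBy b x [] = [x] := rfl

lemma insertBy_cons {α : Type} (b : α → α → Bool) (x y : α) (ys : List α) :
    PySem.List.insertBy b x (y :: ys) =
      if b x y then x :: y :: ys else y :: PySem.List.insertBy b x ys := rfl

lemma insertBy_append_right {α : Type} (b : α → α → Bool) (x : α) (A B : List α)
    (hB : ∀ y ∈ B, b x y = true) :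
    PySem.List.insertBy b x (A ++ B) = PySem.List.insertBy b x A ++ B := by
  induction A with
  | nil =>
    cases B with
    | nil => rfl
    | cons y ys => simp [insertBy_cons, insertBy_nil, hB y (by simp)]
  | cons a A ih =>
    simp only [List.cons_append, insertBy_cons]
    by_cases h : b x a
    · simp [h]
    · simp [h, ih]

lemma insertBy_append_left {α : Type} (b : α → α → Bool) (x : α) (A B : List α)
    (hA : ∀ y ∈ A, b x y = false) :
    PySem.List.insertBy b x (A ++ B) = A ++ PySem.List.insertBy b x B := by
  induction A with
  | nil => rfl
  | cons a A ih =>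
    simp only [List.cons_append, insertBy_cons, hA a (by simp)]
    simp only [Bool.false_eq_true, if_false]
    rw [ih (fun y hy => hA y (by simp [hy]))]

lemma insertBy_congr {α : Type} (b b' : α → α → Bool) (x : α) (ys : List α)
    (h : ∀ y ∈ ys, b x y = b' x y) :
    PySem.List.insertBy b x ys = PySem.List.insertBy b' x ys := by
  induction ys with
  | nil => rfl
  | cons y ys ih =>
    simp only [insertBy_cons, h y (by simp)]
    rw [ih (fun z hz => h z (by simp [hz]))]

lemma sorted_append_singleton {α K : Type} [LT K] [DecidableLT K] (key : α → K) (xs : List α) (x : α) :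
    PySem.List.sorted (xs ++ [x]) key false =
      PySem.List.insertBy (fun a b => decide (key a < key b)) x (PySem.List.sorted xs key false) := by
  rw [PySem.List.sorted_eq_foldl_insertBy, PySem.List.sorted_eq_foldl_insertBy, List.foldl_append]
  rfl

-- a stable sort splits along a predicate whose true-class compares strictly below its false-class
lemma sorted_split {α K : Type} [LT K] [DecidableLT K] (key : α → K) (p : α → Bool) (xs : List α)
    (h : ∀ a ∈ xs, ∀ b ∈ xs, p a = true → p b = false →
      decide (key a < key b) = true ∧ decide (key b < key a) = false) :
    PySem.List.sorted xs key false =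
      PySem.List.sorted (xs.filter p) key false ++
        PySem.List.sorted (xs.filter (fun x => !p x)) key false := by
  induction xs using List.reverseRecOn with
  | nil => rfl
  | append_singleton xs x ih =>
    have hxs : ∀ a ∈ xs, ∀ b ∈ xs, p a = true → p b = false →
        decide (key a < key b) = true ∧ decide (key b < key a) = false := by
      intro a ha b hb
      exact h a (by simp [ha]) b (by simp [hb])
    rw [sorted_append_singleton, ih hxs]
    by_cases hp : p x
    · rw [insertBy_append_right]
      · simp only [List.filter_append, List.filter_singleton, hp, Bool.not_true, cond_true,
          cond_false, List.append_nil]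
        rw [sorted_append_singleton]
      · intro y hy
        rw [PySem.List.mem_sorted] at hy
        rw [List.mem_filter] at hy
        exact (h x (by simp) y (by simp [hy.1]) hp (by simpa using hy.2)).1
    · rw [insertBy_append_left]
      · have hp' : p x = false := by simpa using hp
        simp only [List.filter_append, List.filter_singleton, hp', Bool.not_false, cond_true,
          cond_false, List.append_nil]
        rw [sorted_append_singleton]
      · intro y hy
        rw [PySem.List.mem_sorted] at hy
        rw [List.mem_filter] at hy
        exact (h y (by simp [hy.1]) x (by simp) hy.2 (by simpa using hp)).2

-- two keys that order the members of xs identically sort xs identically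
lemma sorted_key_congr {α K K' : Type} [LT K] [DecidableLT K] [LT K'] [DecidableLT K']
    (k : α → K) (k' : α → K') (xs : List α)
    (h : ∀ a ∈ xs, ∀ b ∈ xs, decide (k a < k b) = decide (k' a < k' b)) :
    PySem.List.sorted xs k false = PySem.List.sorted xs k' false := by
  induction xs using List.reverseRecOn with
  | nil => rfl
  | append_singleton xs x ih =>
    have hxs : ∀ a ∈ xs, ∀ b ∈ xs, decide (k a < k b) = decide (k' a < k' b) := by
      intro a ha b hb; exact h a (by simp [ha]) b (by simp [hb])
    rw [sorted_append_singleton, sorted_append_singleton, ih hxs]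
    apply insertBy_congr
    intro y hy
    rw [PySem.List.mem_sorted] at hy
    exact h x (by simp) y (by simp [hy])

lemma decide_cons_lt_cons (c : Int) (s t : List Int) :
    decide ((c :: s) < (c :: t)) = decide (s < t) := by
  apply decide_eq_decide.mpr
  rw [List.cons_lt_cons_iff]
  simp

lemma cons_lt_cons_of_head_lt {c d : Int} (h : c < d) (s t : List Int) :
    decide ((c :: s) < (d :: t)) = true ∧ decide ((d :: t) < (c :: s)) = false := by
  constructor
  · simp [List.cons_lt_cons_iff]; omega
  · simp [List.cons_lt_cons_iff]; omega

lemma get?_of_contains (e : String) (h : athleticsRank.contains e = true) :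
    athleticsRank.get? e = some (athleticsRank.getD e 0) := by
  rw [PySem.Dict.contains_eq_isSome_get?] at h
  cases hg : athleticsRank.get? e with
  | none => rw [hg] at h; simp at h
  | some r => rw [PySem.Dict.getD_eq_get?_getD, hg]; rfl

lemma keyA_of_ath (e : String) (h : athleticsRank.contains e = true) :
    keyA e = 0 :: athKeyB e := by
  unfold keyA athKeyB
  rw [get?_of_contains e h]
  rfl

lemma dist_AB (el : String) :
    (match (swimDistRank.keys).find? (fun d => PySem.Str.isIn d el) with
     | some d => swimDistRank.getD d 99
     | none => (99 : Int)) =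
    (match (PySem.List.enumerate swimDists 0).find? (fun p => PySem.Str.isIn p.2 el) with
     | some p => p.1
     | none => (99 : Int)) := by
  have hk : swimDistRank.keys = swimDists := by decide
  have he : PySem.List.enumerate swimDists 0 =
      [(0, "50m"), (1, "100m"), (2, "200m"), (3, "400m"), (4, "800m"), (5, "1500m")] := by decide
  rw [hk, he, swimDists]
  by_cases h1 : PySem.Str.isIn "50m" el <;>
  by_cases h2 : PySem.Str.isIn "100m" el <;>
  by_cases h3 : PySem.Str.isIn "200m" el <;>
  by_cases h4 : PySem.Str.isIn "400m" el <;>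
  by_cases h5 : PySem.Str.isIn "800m" el <;>
  by_cases h6 : PySem.Str.isIn "1500m" el <;>
  simp only [List.find?_cons, h1, h2, h3, h4, h5, h6] <;> rfl

lemma stroke_AB (el : String) :
    (match (strokeRank.items).find? (fun p => PySem.Str.isIn p.1 el) with
     | some p => p.2
     | none => (99 : Int)) =
    (match (PySem.List.enumerate strokes 0).find? (fun p => PySem.Str.isIn p.2 el) with
     | some p => p.1
     | none => (99 : Int)) := by
  have hi : strokeRank.items =
      [("freestyle", 0), ("backstroke", 1), ("breaststroke", 2), ("butterfly", 3), ("medley", 4)] := by decide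
  have he : PySem.List.enumerate strokes 0 =
      [(0, "freestyle"), (1, "backstroke"), (2, "breaststroke"), (3, "butterfly"), (4, "medley")] := by decide
  rw [hi, he]
  by_cases h1 : PySem.Str.isIn "freestyle" el <;>
  by_cases h2 : PySem.Str.isIn "backstroke" el <;>
  by_cases h3 : PySem.Str.isIn "breaststroke" el <;>
  by_cases h4 : PySem.Str.isIn "butterfly" el <;>
  by_cases h5 : PySem.Str.isIn "medley" el <;>
  simp only [List.find?_cons, h1, h2, h3, h4, h5] <;> rfl

lemma swimKeyA_eq_swimKeyB (e : String) : swimKeyA e = swimKeyB e := by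
  simp only [swimKeyA, swimKeyB]
  rw [dist_AB, stroke_AB]

lemma keyA_of_swim (e : String) (h0 : athleticsRank.contains e = false) (h1 : isSwimA e = true) :
    keyA e = 1 :: swimKeyB e := by
  unfold keyA
  rw [PySem.Dict.contains_eq_isSome_get?] at h0
  cases hg : athleticsRank.get? e with
  | none => rw [← swimKeyA_eq_swimKeyB]; simp [h1]
  | some r => rw [hg] at h0; simp at h0

lemma keyA_of_other (e : String) (h0 : athleticsRank.contains e = false) (h1 : isSwimA e = false) :
    keyA e = 2 :: otherKeyB e := by
  unfold keyA otherKeyB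
  rw [PySem.Dict.contains_eq_isSome_get?] at h0
  cases hg : athleticsRank.get? e with
  | none => simp [h1]
  | some r => rw [hg] at h0; simp at h0

-- the one-pass partition equals the three filters
lemma partition_eq_filters (events : List String) (a b c : List String) :
    events.foldl bStep (a, b, c) =
      (a ++ events.filter (fun e => athleticsRank.contains e),
       b ++ events.filter (fun e => !athleticsRank.contains e && isSwimA e),
       c ++ events.filter (fun e => !athleticsRank.contains e && !isSwimA e)) := by
  induction events generalizing a b c with
  | nil => simp
  | cons e es ih =>
    rw [List.foldl_cons]
    by_cases h0 : athleticsRank.contains e = true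
    · rw [show bStep (a, b, c) e = (a ++ [e], b, c) by unfold bStep; rw [if_pos h0], ih]
      simp [h0]
    · have h0' : athleticsRank.contains e = false := by simpa using h0
      by_cases h1 : isSwimA e = true
      · have hsw : (PySem.Str.startswith (PySem.Str.lower e) "swimming_" ||
            PySem.Str.startswith (PySem.Str.lower e) "swim") = true := h1
        rw [show bStep (a, b, c) e = (a, b ++ [e], c) by
          unfold bStep; rw [if_neg h0, if_pos hsw], ih]
        simp [h0', h1]
      · have h1' : isSwimA e = false := by simpa using h1
        have hsw : (PySem.Str.startswith (PySem.Str.lower e) "swimming_" ||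
            PySem.Str.startswith (PySem.Str.lower e) "swim") = false := h1'
        rw [show bStep (a, b, c) e = (a, b, c ++ [e]) by
          unfold bStep; rw [if_neg h0, if_neg (by rw [hsw]; exact Bool.false_ne_true)], ih]
        simp [h0', h1']

-- ===== VERDICT (by name: the statement is the Claim_ definition above) =====
set_option maxHeartbeats 1000000 in
theorem sort_events_custom_spec : Claim_equal_sort_events_custom := by
  intro events _
  have hsep0 : ∀ a ∈ events, ∀ b ∈ events,
      (fun e => athleticsRank.contains e) a = true → (fun e => athleticsRank.contains e) b = false →
      decide (keyA a < keyA b) = true ∧ decide (keyA b < keyA a) = false := by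
    intro a _ b _ ha hb
    rw [keyA_of_ath a ha]
    by_cases h1 : isSwimA b
    · rw [keyA_of_swim b hb h1]; exact cons_lt_cons_of_head_lt (by norm_num) _ _
    · rw [keyA_of_other b hb (by simpa using h1)]; exact cons_lt_cons_of_head_lt (by norm_num) _ _
  have hsep1 : ∀ a ∈ events.filter (fun e => !athleticsRank.contains e),
      ∀ b ∈ events.filter (fun e => !athleticsRank.contains e),
      isSwimA a = true → isSwimA b = false →
      decide (keyA a < keyA b) = true ∧ decide (keyA b < keyA a) = false := by
    intro a ha b hb h1a h1b
    rw [List.mem_filter] at ha hb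
    rw [keyA_of_swim a (by simpa using ha.2) h1a, keyA_of_other b (by simpa using hb.2) h1b]
    exact cons_lt_cons_of_head_lt (by norm_num) _ _
  have hA : sort_events_custom events =
      PySem.List.sorted (events.filter (fun e => athleticsRank.contains e)) keyA false ++
      (PySem.List.sorted ((events.filter (fun e => !athleticsRank.contains e)).filter isSwimA) keyA false ++
       PySem.List.sorted ((events.filter (fun e => !athleticsRank.contains e)).filter (fun e => !isSwimA e)) keyA false) := by
    unfold sort_events_custom
    rw [sorted_split keyA (fun e => athleticsRank.contains e) events hsep0,
        sorted_split keyA isSwimA (events.filter (fun e => !athleticsRank.contains e)) hsep1]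
  have hB : sort_events_custom_alt events =
      PySem.List.sorted (events.filter (fun e => athleticsRank.contains e)) athKeyB false ++
      (PySem.List.sorted (events.filter (fun e => !athleticsRank.contains e && isSwimA e)) swimKeyB false ++
       PySem.List.sorted (events.filter (fun e => !athleticsRank.contains e && !isSwimA e)) otherKeyB false) := by
    show PySem.List.sorted (events.foldl bStep ([], [], [])).1 athKeyB false ++
        PySem.List.sorted (events.foldl bStep ([], [], [])).2.1 swimKeyB false ++
        PySem.List.sorted (events.foldl bStep ([], [], [])).2.2 otherKeyB false = _
    rw [partition_eq_filters, List.append_assoc]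
    simp only [List.nil_append]
  unfold Spec_sort_events_custom
  rw [hA, hB, List.filter_filter, List.filter_filter]
  congr 1
  · -- athletics bucket
    apply sorted_key_congr
    intro a ha b hb
    rw [List.mem_filter] at ha hb
    rw [keyA_of_ath a ha.2, keyA_of_ath b hb.2, decide_cons_lt_cons]
  congr 1
  · -- swim bucket
    rw [show List.filter (fun a => isSwimA a && !athleticsRank.contains a) events =
        List.filter (fun e => !athleticsRank.contains e && isSwimA e) events from
      List.filter_congr (fun x _ => Bool.and_comm _ _)]
    apply sorted_key_congr
    intro a ha b hb
    rw [List.mem_filter] at ha hb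
    have ha' := ha.2; have hb' := hb.2
    simp only [Bool.and_eq_true, Bool.not_eq_true'] at ha' hb'
    rw [keyA_of_swim a ha'.1 ha'.2, keyA_of_swim b hb'.1 hb'.2, decide_cons_lt_cons]
  · -- other bucket
    rw [show List.filter (fun a => !isSwimA a && !athleticsRank.contains a) events =
        List.filter (fun e => !athleticsRank.contains e && !isSwimA e) events from
      List.filter_congr (fun x _ => Bool.and_comm _ _)]
    apply sorted_key_congr
    intro a ha b hb
    rw [List.mem_filter] at ha hb
    have ha' := ha.2; have hb' := hb.2
    simp only [Bool.and_eq_true, Bool.not_eq_true'] at ha' hb'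
    rw [keyA_of_other a ha'.1 ha'.2, keyA_of_other b hb'.1 hb'.2, decide_cons_lt_cons]
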